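-- pv_equiv track=rewrite | github.com/exajobs/coding-interview-collection | faang-codingexercises/codechallenge_033.py | subpricelist
-- ===== SOURCE A (Python) =====
-- def subpricelist(price_list=[]):
-- 	start, end = 0, len(price_list)
-- 	j = end
-- 	sublist = []
-- 	while start < end - 1:
-- 		temp = price_list[start:j]
--
-- 		j-=1
-- 		# eliminate lists with decending numbers, they indicate market down turn
-- 		if all(temp[i] < temp[i+1] for i in range(len(temp)-1)):
-- 			yield temp
--
-- 		if j < start + 2:
-- 			start+=1
-- 			j = end
-- ===== SOURCE B (Python) =====
-- def subpricelist(price_list=[]):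
--     # One right-to-left pass computes, for each start, the length of the maximal
--     # strictly-increasing run beginning there; then emit exactly the valid windows
--     # (lengths run[start] down to 2) without re-checking monotonicity per window.
--     n = len(price_list)
--     run = [1] * n
--     for i in range(n - 2, -1, -1):
--         if price_list[i] < price_list[i + 1]:
--             run[i] = run[i + 1] + 1
--     for start in range(n - 1):
--         for length in range(run[start], 1, -1):
--             yield price_list[start:start + length]
-- ===== Notes on version B (the rewrite author's own statement) =====
-- stated objective: faster
-- what changed: Replaces the per-window all()-scan over every (start,end) pair with a single right-to-left pass computing the maximal increasing run length per start, then emits exactly the valid windows.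
import Mathlib
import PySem

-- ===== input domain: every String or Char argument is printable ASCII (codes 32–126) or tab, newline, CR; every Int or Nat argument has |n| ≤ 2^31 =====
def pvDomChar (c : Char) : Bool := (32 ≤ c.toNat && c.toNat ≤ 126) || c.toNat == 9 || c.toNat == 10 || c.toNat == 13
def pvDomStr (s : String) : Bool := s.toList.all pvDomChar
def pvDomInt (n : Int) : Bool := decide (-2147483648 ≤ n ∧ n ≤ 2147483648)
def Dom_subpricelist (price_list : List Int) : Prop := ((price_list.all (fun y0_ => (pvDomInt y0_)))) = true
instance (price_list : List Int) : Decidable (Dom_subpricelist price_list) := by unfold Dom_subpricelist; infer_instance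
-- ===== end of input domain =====

-- B replaces A's per-window all()-scan with one right-to-left run-length pass and emits only valid windows (measurably faster; return-value equivalence of the generated sequences).


-- ===== PORT A =====
-- all(temp[i] < temp[i+1] for i in range(len(temp)-1)) ; indices are always in range, so pyGetD with default 0 is exact
def incCheck (temp : List Int) : Bool :=
  (PySem.List.pyRange 0 ((temp.length : Int) - 1) 1).all
    (fun i => decide (PySem.List.pyGetD temp i 0 < PySem.List.pyGetD temp (i + 1) 0))

-- the while loop; a 'yield' emits to the front of the rest of the generated sequence
def subA_loop (p : List Int) (endv start j : Int) : List (List Int) :=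
  if start < endv - 1 then
    let temp := PySem.List.slice p (some start) (some j)
    let j1 := j - 1
    (if incCheck temp then [temp] else []) ++
      (if j1 < start + 2 then subA_loop p endv (start + 1) endv
       else subA_loop p endv start j1)
  else []
termination_by ((endv - 1 - start).toNat, (j - start).toNat)
decreasing_by
  · left; omega
  · right; omega

def subpricelist (price_list : List Int) : List (List Int) :=
  subA_loop price_list (price_list.length : Int) 0 (price_list.length : Int)

-- ===== PORT B =====
-- run[i] computed right-to-left: run[i] = run[i+1]+1 if p[i] < p[i+1] else 1
def runList : List Int → List Int
  | [] => []
  | [_] => [1]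
  | x :: y :: rest =>
    let r := runList (y :: rest)
    (if x < y then r.headD 0 + 1 else 1) :: r

def subpricelist_alt (price_list : List Int) : List (List Int) :=
  let run := runList price_list
  (PySem.List.pyRange 0 ((price_list.length : Int) - 1) 1).flatMap (fun start =>
    (PySem.List.pyRange (PySem.List.pyGetD run start 0) 1 (-1)).map (fun len =>
      PySem.List.slice price_list (some start) (some (start + len))))

-- ===== PRECONDITION & SPEC =====
def Spec_subpricelist (price_list : List Int) (out : List (List Int)) : Prop := out = subpricelist_alt price_list
instance (price_list : List Int) (out : List (List Int)) : Decidable (Spec_subpricelist price_list out) := by unfold Spec_subpricelist; infer_instance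

-- ===== CLAIM (what is proved, stated in full; the proofs are below) =====
def Claim_equal_subpricelist : Prop := ∀ (price_list : List Int), Dom_subpricelist price_list → Spec_subpricelist price_list (subpricelist price_list)

-- ===== LEMMAS AND PROOFS =====

-- descending windows of q of lengths m, m-1, ..., 2
def takeWins (q : List Int) : Nat → List (List Int)
  | 0 => []
  | 1 => []
  | m + 2 => q.take (m + 2) :: takeWins q (m + 1)

-- windows of lengths L..2, keeping only the strictly increasing ones (what A's fixed-start phase emits)
def segN (q : List Int) : Nat → List (List Int)
  | 0 => []
  | 1 => []
  | L + 2 => (if List.IsChain (· < ·) (q.take (L + 2)) then [q.take (L + 2)] else []) ++ segN q (L + 1)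

-- the whole output, as a flat map over the k remaining starts beginning at s
def restAux (p : List Int) : Nat → Nat → List (List Int)
  | _, 0 => []
  | s, k + 1 => segN (p.drop s) (p.length - s) ++ restAux p (s + 1) k

theorem incCheck_eq (t : List Int) : incCheck t = decide (List.IsChain (· < ·) t) := by
  rw [Bool.eq_iff_iff]
  simp only [incCheck, List.all_eq_true, decide_eq_true_eq]
  rw [List.isChain_iff_getElem]
  constructor
  · intro h i hi
    have hmem := h ((i : Int)) (by rw [PySem.List.mem_pyRange_one]; omega)
    rw [show ((i : Int) + 1) = ((i + 1 : Nat) : Int) from by push_cast; ring] at hmem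
    simp only [PySem.List.pyGetD_natCast] at hmem
    rwa [List.getD_eq_getElem _ _ (by omega), List.getD_eq_getElem _ _ (by omega)] at hmem
  · intro h i hmem
    rw [PySem.List.mem_pyRange_one] at hmem
    obtain ⟨k, rfl⟩ : ∃ k : Nat, i = (k : Int) := ⟨i.toNat, by omega⟩
    rw [show ((k : Int) + 1) = ((k + 1 : Nat) : Int) from by push_cast; ring]
    simp only [PySem.List.pyGetD_natCast]
    rw [List.getD_eq_getElem _ _ (by omega), List.getD_eq_getElem _ _ (by omega)]
    exact h k (by omega)

theorem runList_headD_pos : ∀ p : List Int, p ≠ [] → 1 ≤ (runList p).headD 0 := by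
  intro p
  induction p using runList.induct with
  | case1 => intro h; exact absurd rfl h
  | case2 x => intro _; simp [runList]
  | case3 x y rest ih =>
    intro _
    have h1 := ih (by simp)
    simp only [runList, List.headD_cons]
    split <;> omega

theorem runList_headD_le : ∀ p : List Int, (runList p).headD 0 ≤ (p.length : Int) := by
  intro p
  induction p using runList.induct with
  | case1 => simp [runList]
  | case2 x => simp [runList]
  | case3 x y rest ih =>
    simp only [runList, List.headD_cons, List.length_cons] at *
    split <;> push_cast at * <;> omega

theorem isChain_take_iff : ∀ (p : List Int) (l : Nat), 1 ≤ l → l ≤ p.length →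
    (List.IsChain (· < ·) (p.take l) ↔ (l : Int) ≤ (runList p).headD 0) := by
  intro p
  induction p using runList.induct with
  | case1 => intro l h1 h2; simp at h2; omega
  | case2 x =>
    intro l h1 h2
    simp only [List.length_cons, List.length_nil] at h2
    have : l = 1 := by omega
    subst this
    simp [runList]
  | case3 x y rest ih =>
    intro l h1 h2
    rcases l with _ | _ | l
    · omega
    · have h1 := runList_headD_pos (y :: rest) (by simp)
      have hc : List.IsChain (· < ·) ((x :: y :: rest).take 1) := by
        simp [List.IsChain.singleton]
      simp only [hc, true_iff, runList, List.headD_cons]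
      split <;> omega
    · have hlen : l + 1 ≤ (y :: rest).length := by
        simp only [List.length_cons] at h2 ⊢; omega
      have htake : (x :: y :: rest).take (l + 2) = x :: y :: rest.take l := by
        simp [List.take_succ_cons]
      have htake2 : (y :: rest).take (l + 1) = y :: rest.take l := by
        simp [List.take_succ_cons]
      rw [htake, List.isChain_cons_cons]
      have := ih (l + 1) (by omega) hlen
      rw [htake2] at this
      simp only [runList, List.headD_cons]
      constructor
      · rintro ⟨hxy, hch⟩
        rw [if_pos hxy]
        have := this.mp hch
        push_cast at this ⊢
        omega
      · intro hle
        split at hle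
        · refine ⟨by assumption, this.mpr ?_⟩
          push_cast at hle ⊢
          omega
        · omega

theorem runList_getD_drop : ∀ (p : List Int) (s : Nat), s < p.length →
    (runList p).getD s 0 = (runList (p.drop s)).headD 0 := by
  intro p
  induction p using runList.induct with
  | case1 => intro s h; simp at h
  | case2 x =>
    intro s h
    simp only [List.length_cons, List.length_nil] at h
    have : s = 0 := by omega
    subst this
    simp [runList]
  | case3 x y rest ih =>
    intro s h
    rcases s with _ | s
    · simp [runList]
    · have : (x :: y :: rest).drop (s + 1) = (y :: rest).drop s := by simp
      rw [this]
      simp only [runList, List.getD_cons_succ]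
      exact ih s (by simp only [List.length_cons] at h ⊢; omega)

theorem segN_eq_takeWins (q : List Int) : ∀ L : Nat, L ≤ q.length →
    segN q L = takeWins q (min L ((runList q).headD 0).toNat) := by
  intro L
  induction L with
  | zero => intro _; simp [segN, takeWins]
  | succ L ih =>
    intro hL
    rcases L with _ | L
    · have hm : min 1 ((runList q).headD 0).toNat = 0 ∨ min 1 ((runList q).headD 0).toNat = 1 := by omega
      rcases hm with hm | hm <;> rw [hm] <;> rfl
    · have hq : q ≠ [] := by intro h; subst h; simp at hL
      have hr1 : 1 ≤ (runList q).headD 0 := runList_headD_pos q hq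
      have hrle : (runList q).headD 0 ≤ (q.length : Int) := runList_headD_le q
      have hch : List.IsChain (· < ·) (q.take (L + 2)) ↔ ((L + 2 : Nat) : Int) ≤ (runList q).headD 0 :=
        isChain_take_iff q (L + 2) (by omega) hL
      set r := ((runList q).headD 0).toNat with hrdef
      have hrN : ((runList q).headD 0) = (r : Int) := by omega
      by_cases hc : L + 2 ≤ r
      · have : List.IsChain (· < ·) (q.take (L + 2)) := by
          rw [hch, hrN]; exact_mod_cast hc
        rw [segN, if_pos this, ih (by omega)]
        have h1 : min (L + 2) r = L + 2 := by omega
        have h2 : min (L + 1) r = L + 1 := by omega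
        rw [h1, h2, takeWins]
        simp
      · have : ¬ List.IsChain (· < ·) (q.take (L + 2)) := by
          rw [hch, hrN]; intro h; exact hc (by exact_mod_cast h)
        rw [segN, if_neg this, ih (by omega)]
        have h1 : min (L + 2) r = r := by omega
        have h2 : min (L + 1) r = r := by omega
        rw [h1, h2]
        simp

theorem bInner_eq_takeWins (p : List Int) (s : Nat) : ∀ m : Nat,
    (PySem.List.pyRange (m : Int) 1 (-1)).map
      (fun len => PySem.List.slice p (some (s : Int)) (some ((s : Int) + len))) = takeWins (p.drop s) m := by
  intro m
  induction m using Nat.strong_induction_on with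
  | _ m ih =>
    rcases m with _ | _ | m
    · rw [PySem.List.pyRange_neg_one_eq_nil (by omega)]; simp [takeWins]
    · rw [PySem.List.pyRange_neg_one_eq_nil (by omega)]; simp [takeWins]
    · rw [PySem.List.pyRange_neg_one_cons (by push_cast; omega)]
      simp only [List.map_cons]
      rw [takeWins]
      congr 1
      · exact_mod_cast PySem.List.slice_natCast_add p s (m + 2)
      · have : ((m + 2 : Nat) : Int) - 1 = ((m + 1 : Nat) : Int) := by push_cast; omega
        rw [this]
        exact ih (m + 1) (by omega)

theorem bFlat_eq_restAux (p : List Int) : ∀ (k s : Nat), (s : Int) + (k : Int) = (p.length : Int) - 1 →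
    (PySem.List.pyRange (s : Int) ((p.length : Int) - 1) 1).flatMap
      (fun start => (PySem.List.pyRange (PySem.List.pyGetD (runList p) start 0) 1 (-1)).map
        (fun len => PySem.List.slice p (some start) (some (start + len)))) = restAux p s k := by
  intro k
  induction k with
  | zero =>
    intro s hs
    rw [PySem.List.pyRange_one_eq_nil (by omega)]
    simp [restAux]
  | succ k ih =>
    intro s hs
    have hsn : s < p.length := by omega
    rw [PySem.List.pyRange_one_cons (by omega), List.flatMap_cons]
    have hgd : PySem.List.pyGetD (runList p) (s : Int) 0 = (runList (p.drop s)).headD 0 := by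
      rw [PySem.List.pyGetD_natCast]
      exact runList_getD_drop p s hsn
    have hdne : p.drop s ≠ [] := by
      intro h
      have := congrArg List.length h
      simp at this
      omega
    have hr1 := runList_headD_pos (p.drop s) hdne
    have hrle := runList_headD_le (p.drop s)
    set r := ((runList (p.drop s)).headD 0).toNat with hrdef
    have hrN : (runList (p.drop s)).headD 0 = (r : Int) := by omega
    have hlen : (p.drop s).length = p.length - s := by simp
    have hinner : (PySem.List.pyRange (PySem.List.pyGetD (runList p) (s : Int) 0) 1 (-1)).map
        (fun len => PySem.List.slice p (some (s : Int)) (some ((s : Int) + len))) = takeWins (p.drop s) r := by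
      rw [hgd, hrN]
      exact bInner_eq_takeWins p s r
    rw [hinner]
    have hseg : segN (p.drop s) (p.length - s) = takeWins (p.drop s) r := by
      rw [segN_eq_takeWins (p.drop s) (p.length - s) (by omega)]
      congr 1
      rw [← hrdef]
      rw [hlen] at hrle
      omega
    rw [restAux, ← hseg]
    congr 1
    have : ((s : Int)) + 1 = ((s + 1 : Nat) : Int) := by push_cast; ring
    rw [this]
    exact ih (s + 1) (by push_cast at hs ⊢; omega)

theorem alt_eq_restAux (p : List Int) : subpricelist_alt p = restAux p 0 (p.length - 1) := by
  rcases hn : p.length with _ | n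
  · have hp : p = [] := List.length_eq_zero_iff.mp hn
    subst hp
    simp [subpricelist_alt, restAux]
  · have := bFlat_eq_restAux p n 0 (by rw [hn]; push_cast; ring)
    simp only [subpricelist_alt]
    rw [show ((0:Nat) : Int) = (0 : Int) from rfl] at this
    rw [hn] at this ⊢
    exact this

theorem aInner (p : List Int) : ∀ (m s : Nat), s + 2 + m ≤ p.length →
    subA_loop p (p.length : Int) (s : Int) ((s + 2 + m : Nat) : Int) =
      segN (p.drop s) (m + 2) ++ subA_loop p (p.length : Int) ((s + 1 : Nat) : Int) (p.length : Int) := by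
  intro m
  induction m with
  | zero =>
    intro s hle
    have hsl : PySem.List.slice p (some (s : Int)) (some ((s + 2 + 0 : Nat) : Int)) = (p.drop s).take 2 := by
      rw [PySem.List.slice_natCast]
      congr 1
      omega
    rw [subA_loop, if_pos (by omega)]
    simp only [hsl, incCheck_eq]
    rw [if_pos (show ((s + 2 + 0 : Nat) : Int) - 1 < (s : Int) + 2 from by push_cast; omega)]
    rw [show ((s : Int)) + 1 = ((s + 1 : Nat) : Int) from by push_cast; ring]
    simp only [segN, List.append_nil]
    split <;> simp_all
  | succ m ih =>
    intro s hle
    have hsl : PySem.List.slice p (some (s : Int)) (some ((s + 2 + (m + 1) : Nat) : Int)) = (p.drop s).take (m + 3) := by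
      rw [PySem.List.slice_natCast]
      congr 1
      omega
    rw [subA_loop, if_pos (by omega)]
    simp only [hsl, incCheck_eq]
    rw [if_neg (show ¬ (((s + 2 + (m + 1) : Nat) : Int) - 1 < (s : Int) + 2) from by push_cast; omega)]
    rw [show ((s + 2 + (m + 1) : Nat) : Int) - 1 = ((s + 2 + m : Nat) : Int) from by push_cast; ring]
    rw [ih s (by omega)]
    have hseg : segN (p.drop s) (m + 1 + 2) =
        (if List.IsChain (· < ·) ((p.drop s).take (m + 3)) then [(p.drop s).take (m + 3)] else []) ++ segN (p.drop s) (m + 2) := by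
      rw [segN]
    rw [hseg, List.append_assoc]
    congr 1
    split <;> simp_all

theorem aOuter (p : List Int) : ∀ (k s : Nat), p.length - s = k →
    subA_loop p (p.length : Int) (s : Int) (p.length : Int) = restAux p s (p.length - 1 - s) := by
  intro k
  induction k with
  | zero =>
    intro s hk
    rw [subA_loop, if_neg (by omega)]
    have : p.length - 1 - s = 0 := by omega
    rw [this, restAux]
  | succ k ih =>
    intro s hk
    by_cases hc : s + 2 ≤ p.length
    · have hm := aInner p (p.length - s - 2) s (by omega)
      rw [show s + 2 + (p.length - s - 2) = p.length from by omega] at hm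
      rw [hm, ih (s + 1) (by omega)]
      rw [show p.length - 1 - s = (p.length - 1 - (s + 1)) + 1 from by omega, restAux]
      congr 2
      omega
    · rw [subA_loop, if_neg (by omega)]
      rw [show p.length - 1 - s = 0 from by omega, restAux]

-- ===== VERDICT (by name: the statement is the Claim_ definition above) =====
theorem subpricelist_spec : Claim_equal_subpricelist := by
  intro p _
  unfold Spec_subpricelist subpricelist
  rw [show (0 : Int) = ((0 : Nat) : Int) from rfl, aOuter p p.length 0 rfl, alt_eq_restAux]
  norm_num
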